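-- pv_equiv track=rewrite | github.com/dmsavkov/Notion-Query-Translator | evaluation/test_general_precheck.py | _normalize_required_resources
-- ===== SOURCE A (Python) =====
-- from typing import Any, Dict, Optional
--
-- def _normalize_required_resources(value: Any) -> list[str]:
--     if isinstance(value, str):
--         cleaned = value.strip()
--         return [cleaned] if cleaned else []
--
--     if not isinstance(value, (list, tuple, set)):
--         return []
--
--     normalized: list[str] = []
--     seen: set[str] = set()
--     for item in value:
--         cleaned = str(item).strip()
--         if not cleaned or cleaned in seen:
--             continue
--         seen.add(cleaned)
--         normalized.append(cleaned)
--     return sorted(normalized)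
-- ===== SOURCE B (Python) =====
-- def _normalize_required_resources(value):
--     if isinstance(value, str):
--         cleaned = value.strip()
--         return [cleaned] if cleaned else []
--
--     if not isinstance(value, (list, tuple, set)):
--         return []
--
--     cleaned = sorted(s for s in (str(item).strip() for item in value) if s)
--     out = []
--     for s in cleaned:
--         if not out or out[-1] != s:
--             out.append(s)
--     return out
-- ===== Notes on version B (the rewrite author's own statement) =====
-- stated objective: alternative
-- what changed: B drops the hash-set first-occurrence dedup: it filters and sorts the stripped items first, then removes duplicates in one adjacent-equality pass over the sorted list (sort-then-adjacent-dedup instead of set-membership dedup then sort).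
import Mathlib
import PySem

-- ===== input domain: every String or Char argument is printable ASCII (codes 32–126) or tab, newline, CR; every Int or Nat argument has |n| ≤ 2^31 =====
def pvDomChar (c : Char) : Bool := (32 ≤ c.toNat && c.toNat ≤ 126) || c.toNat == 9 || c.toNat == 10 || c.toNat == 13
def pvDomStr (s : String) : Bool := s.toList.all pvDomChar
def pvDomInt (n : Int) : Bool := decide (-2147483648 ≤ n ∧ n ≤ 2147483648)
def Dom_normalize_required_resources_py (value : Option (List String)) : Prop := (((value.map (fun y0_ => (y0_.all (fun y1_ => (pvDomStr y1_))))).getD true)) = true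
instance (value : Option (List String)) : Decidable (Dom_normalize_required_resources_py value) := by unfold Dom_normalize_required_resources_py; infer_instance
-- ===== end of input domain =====

-- B replaces A's hash-set first-occurrence dedup (then sort) by filter, sort, then one
-- adjacent-equality dedup pass over the sorted list; same result, no speed claim.

-- ===== PORT A =====
-- A's str branch and the non-collection branch are unreachable for the typed input
-- Option (List String): none = a non-collection (→ []), some xs = the list/tuple/set branch.
def normalize_required_resources_py (value : Option (List String)) : List String :=
  match value with
  | none => []
  | some xs =>
    let st : List String × PySem.Set String :=
      xs.foldl (fun p item =>
        let cleaned := PySem.Str.strip item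
        if cleaned = "" ∨ cleaned ∈ p.2 then p
        else (p.1 ++ [cleaned], PySem.Set.add p.2 cleaned)) ([], PySem.Set.empty)
    PySem.List.sorted st.1 (fun x => x) false

-- ===== PORT B =====
-- cleaned = sorted of the nonempty stripped items; then 'for s in cleaned: if not out or
-- out[-1] != s: out.append(s)' as a fold over out.
def normalize_required_resources_py_alt (value : Option (List String)) : List String :=
  match value with
  | none => []
  | some xs =>
    let cleaned := PySem.List.sorted ((xs.map PySem.Str.strip).filter (fun s => decide (s ≠ ""))) (fun x => x) false
    cleaned.foldl (fun out s => if out = [] ∨ out.getLast? ≠ some s then out ++ [s] else out) []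

-- ===== PRECONDITION & SPEC =====
def Spec_normalize_required_resources_py (value : Option (List String)) (out : List String) : Prop := out = normalize_required_resources_py_alt value
instance (value : Option (List String)) (out : List String) : Decidable (Spec_normalize_required_resources_py value out) := by unfold Spec_normalize_required_resources_py; infer_instance

-- ===== CLAIM (what is proved, stated in full; the proofs are below) =====
def Claim_equal_normalize_required_resources_py : Prop := ∀ (value : Option (List String)), Dom_normalize_required_resources_py value → Spec_normalize_required_resources_py value (normalize_required_resources_py value)

-- ===== LEMMAS AND PROOFS =====

-- proof-side recursive view of B's adjacent-dedup loop
def dropAdjDups : List String → List String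
  | [] => []
  | [a] => [a]
  | a :: b :: t => if a = b then dropAdjDups (b :: t) else a :: dropAdjDups (b :: t)

-- B's loop, run from a state whose last element is a, computes dropAdjDups (a :: l)
theorem adjFold_from (l : List String) (acc : List String) (a : String)
    (h : acc.getLast? = some a) :
    l.foldl (fun out s => if out = [] ∨ out.getLast? ≠ some s then out ++ [s] else out) acc
      = acc.dropLast ++ dropAdjDups (a :: l) := by
  induction l generalizing acc a with
  | nil =>
    have hne : acc ≠ [] := by intro e; simp [e] at h
    have : acc.getLast hne = a := by
      have := List.getLast?_eq_some_getLast (l := acc) (h := hne)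
      rw [this] at h
      exact Option.some.inj h
    simp only [List.foldl_nil, dropAdjDups]
    rw [← this, List.dropLast_append_getLast hne]
  | cons b t ih =>
    simp only [List.foldl_cons]
    have hne : acc ≠ [] := by intro e; simp [e] at h
    by_cases hab : a = b
    · have hcond : ¬(acc = [] ∨ acc.getLast? ≠ some b) := by
        rw [h, hab]
        simp [hne]
      rw [if_neg hcond, ih acc a h, hab]
      simp [dropAdjDups]
    · have hstep : (if acc = [] ∨ acc.getLast? ≠ some b then acc ++ [b] else acc) = acc ++ [b] := by
        rw [if_pos]
        right
        rw [h]
        simpa using hab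
      rw [hstep, ih (acc ++ [b]) b (by simp)]
      have h1 : dropAdjDups (a :: b :: t) = a :: dropAdjDups (b :: t) := by
        simp [dropAdjDups, hab]
      have h2 : (acc ++ [b]).dropLast = acc := by simp
      rw [h1, h2]
      have hsplit : acc = acc.dropLast ++ [a] := by
        have hg : acc.getLast hne = a := by
          have := List.getLast?_eq_some_getLast (l := acc) (h := hne)
          rw [this] at h
          exact Option.some.inj h
        rw [← hg, List.dropLast_append_getLast hne]
      conv_lhs => rw [hsplit]
      simp

-- B's loop from the empty state is exactly dropAdjDups
theorem adjFold_eq (l : List String) :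
    l.foldl (fun out s => if out = [] ∨ out.getLast? ≠ some s then out ++ [s] else out) []
      = dropAdjDups l := by
  cases l with
  | nil => rfl
  | cons b t =>
    simp only [List.foldl_cons, List.nil_append]
    exact adjFold_from t [b] b rfl

-- membership is preserved by adjacent dedup
theorem mem_dropAdjDups (l : List String) (a : String) : a ∈ dropAdjDups l ↔ a ∈ l := by
  induction l with
  | nil => simp [dropAdjDups]
  | cons x t ih =>
    cases t with
    | nil => simp [dropAdjDups]
    | cons y u =>
      by_cases h : x = y
      · subst h
        rw [show dropAdjDups (x :: x :: u) = dropAdjDups (x :: u) from by simp [dropAdjDups]]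
        rw [ih]
        simp
      · rw [show dropAdjDups (x :: y :: u) = x :: dropAdjDups (y :: u) from by simp [dropAdjDups, h]]
        simp [ih]

-- adjacent dedup of a ≤-sorted list is strictly increasing
theorem pairwise_lt_dropAdjDups (l : List String) (h : l.Pairwise (· ≤ ·)) :
    (dropAdjDups l).Pairwise (· < ·) := by
  induction l with
  | nil => simp [dropAdjDups]
  | cons x t ih =>
    cases t with
    | nil => simp [dropAdjDups]
    | cons y u =>
      rcases List.pairwise_cons.mp h with ⟨hx, ht⟩
      by_cases hxy : x = y
      · rw [show dropAdjDups (x :: y :: u) = dropAdjDups (y :: u) from by simp [dropAdjDups, hxy]]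
        exact ih ht
      · rw [show dropAdjDups (x :: y :: u) = x :: dropAdjDups (y :: u) from by simp [dropAdjDups, hxy]]
        refine List.pairwise_cons.mpr ⟨?_, ih ht⟩
        intro z hz
        have hzmem : z ∈ y :: u := (mem_dropAdjDups _ _).mp hz
        refine lt_of_le_of_ne (hx z hzmem) ?_
        intro hxz
        subst hxz
        rcases List.mem_cons.mp hzmem with h1 | h2
        · exact hxy h1
        · rcases List.pairwise_cons.mp ht with ⟨hy, _⟩
          exact hxy (le_antisymm (hx y List.mem_cons_self) (hy x h2))

-- A's loop invariant: normalized stays Nodup and its members are those of the state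
-- plus the nonempty stripped items processed so far; seen always has the same members.
theorem aLoop_inv (xs : List String) (p : List String × PySem.Set String)
    (hnd : p.1.Nodup) (hmem : ∀ a, a ∈ p.2 ↔ a ∈ p.1) :
    (xs.foldl (fun p item =>
        let cleaned := PySem.Str.strip item
        if cleaned = "" ∨ cleaned ∈ p.2 then p
        else (p.1 ++ [cleaned], PySem.Set.add p.2 cleaned)) p).1.Nodup ∧
    (∀ a, a ∈ (xs.foldl (fun p item =>
        let cleaned := PySem.Str.strip item
        if cleaned = "" ∨ cleaned ∈ p.2 then p
        else (p.1 ++ [cleaned], PySem.Set.add p.2 cleaned)) p).1 ↔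
        a ∈ p.1 ∨ (a ∈ xs.map PySem.Str.strip ∧ a ≠ "")) := by
  induction xs generalizing p with
  | nil => simpa using hnd
  | cons x xs ih =>
    simp only [List.foldl_cons]
    by_cases hc : PySem.Str.strip x = "" ∨ PySem.Str.strip x ∈ p.2
    · simp only [if_pos hc]
      obtain ⟨h1, h2⟩ := ih p hnd hmem
      refine ⟨h1, fun a => ?_⟩
      rw [h2 a]
      constructor
      · rintro (h | h)
        · exact Or.inl h
        · exact Or.inr ⟨by simp [h.1], h.2⟩
      · rintro (h | ⟨hm, hne⟩)
        · exact Or.inl h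
        · simp only [List.map_cons, List.mem_cons] at hm
          rcases hm with rfl | hm
          · rcases hc with hc | hc
            · exact absurd hc hne
            · exact Or.inl ((hmem _).mp hc)
          · exact Or.inr ⟨hm, hne⟩
    · simp only [if_neg hc]
      rw [not_or] at hc
      obtain ⟨hne, hnotin⟩ := hc
      have hnotin1 : PySem.Str.strip x ∉ p.1 := fun h => hnotin ((hmem _).mpr h)
      have hnd' : (p.1 ++ [PySem.Str.strip x]).Nodup := by
        refine List.Nodup.append hnd (List.nodup_singleton _) ?_
        intro a ha hb
        simp only [List.mem_singleton] at hb
        exact hnotin1 (hb ▸ ha)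
      have hmem' : ∀ a, a ∈ PySem.Set.add p.2 (PySem.Str.strip x) ↔ a ∈ p.1 ++ [PySem.Str.strip x] := by
        intro a
        rw [PySem.Set.mem_add]
        simp [hmem a]
      obtain ⟨h1, h2⟩ := ih (p.1 ++ [PySem.Str.strip x], PySem.Set.add p.2 (PySem.Str.strip x)) hnd' hmem'
      refine ⟨h1, fun a => ?_⟩
      rw [h2 a]
      simp only [List.mem_append, List.mem_cons, List.map_cons]
      constructor
      · rintro ((h | rfl | h0) | ⟨hm, hn⟩)
        · exact Or.inl h
        · exact Or.inr ⟨Or.inl rfl, hne⟩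
        · cases h0
        · exact Or.inr ⟨Or.inr hm, hn⟩
      · rintro (h | ⟨(rfl | hm), hn⟩)
        · exact Or.inl (Or.inl h)
        · exact Or.inl (Or.inr (Or.inl rfl))
        · exact Or.inr ⟨hm, hn⟩

-- ===== VERDICT (by name: the statement is the Claim_ definition above) =====
theorem normalize_required_resources_py_spec : Claim_equal_normalize_required_resources_py := by
  intro value _
  unfold Spec_normalize_required_resources_py
  match value with
  | none => rfl
  | some xs =>
    simp only [normalize_required_resources_py, normalize_required_resources_py_alt]
    rw [adjFold_eq]
    obtain ⟨hnd, hm⟩ := aLoop_inv xs ([], PySem.Set.empty) (by simp) (by simp [PySem.Set.empty])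
    set st := xs.foldl (fun p item =>
        let cleaned := PySem.Str.strip item
        if cleaned = "" ∨ cleaned ∈ p.2 then p
        else (p.1 ++ [cleaned], PySem.Set.add p.2 cleaned)) ([], PySem.Set.empty) with hst
    set filtered := (xs.map PySem.Str.strip).filter (fun s => decide (s ≠ "")) with hf
    set s := PySem.List.sorted filtered (fun x => x) false with hs
    have hzsP : (dropAdjDups s).Pairwise (· < ·) :=
      pairwise_lt_dropAdjDups s (PySem.List.sorted_pairwise filtered (fun x => x))
    have hzsnd : (dropAdjDups s).Nodup := hzsP.imp (fun h => ne_of_lt h)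
    have hmemz : ∀ a, a ∈ dropAdjDups s ↔ a ∈ st.1 := by
      intro a
      rw [mem_dropAdjDups, hs, PySem.List.mem_sorted, hm a, hf]
      simp [List.mem_filter]
    have hperm : (dropAdjDups s).Perm st.1 :=
      (List.perm_ext_iff_of_nodup hzsnd hnd).mpr hmemz
    exact PySem.List.sorted_eq_of_perm_of_pairwise_lt st.1 (dropAdjDups s) (fun x => x) hperm hzsP
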